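-- pv_equiv track=rewrite | github.com/Emmanwani/Guess-the-Word-Game | wordGame/wordGame.py | get_word_families
-- ===== SOURCE A (Python) =====
-- def get_word_families(word_list, guess, current_progress):
--     families = {}
--     for word in word_list:
--         # Create a pattern based on the guessed letter and the current progress
--         family_pattern = "".join([char if char == guess or char in current_progress else "_" for char in word])
--
--         # Add word to the corresponding family
--         if family_pattern not in families:
--             families[family_pattern] = []
--         families[family_pattern].append(word)
--
--     return families
-- ===== SOURCE B (Python) =====
-- def get_word_families(word_list, guess, current_progress):
--     def pattern(word):
--         return "".join(c if c == guess or c in current_progress else "_" for c in word)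
--     pats = [pattern(w) for w in word_list]
--     keys = list(dict.fromkeys(pats))
--     return {k: [w for p, w in zip(pats, word_list) if p == k] for k in keys}
-- ===== Notes on version B (the rewrite author's own statement) =====
-- stated objective: alternative
-- what changed: Replaces A's single pass that mutates a dict (setdefault-and-append per word) with a two-pass pipeline: precompute every word's masking pattern, dedup the patterns to get the family keys in first-occurrence order, then build each family by filtering the (pattern, word) pairs.
import Mathlib
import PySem

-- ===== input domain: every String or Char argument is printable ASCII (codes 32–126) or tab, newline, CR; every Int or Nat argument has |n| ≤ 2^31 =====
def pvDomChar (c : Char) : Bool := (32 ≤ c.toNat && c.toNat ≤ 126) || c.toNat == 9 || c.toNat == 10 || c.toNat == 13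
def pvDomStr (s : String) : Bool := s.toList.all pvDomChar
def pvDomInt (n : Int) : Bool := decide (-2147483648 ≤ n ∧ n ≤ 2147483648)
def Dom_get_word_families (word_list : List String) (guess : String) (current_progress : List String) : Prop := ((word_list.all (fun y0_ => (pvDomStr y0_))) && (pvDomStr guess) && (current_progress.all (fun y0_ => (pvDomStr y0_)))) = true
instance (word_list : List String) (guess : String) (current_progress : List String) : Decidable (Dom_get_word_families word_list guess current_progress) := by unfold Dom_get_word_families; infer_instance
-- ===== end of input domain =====

-- B replaces A's incremental dict-mutation loop by a two-pass pipeline (precompute all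
-- patterns, dedup the patterns for the keys, then collect each family by filtering);
-- objective: alternative decomposition (one filter pass per distinct pattern, so costlier
-- on large inputs with many families), same result.

-- ===== PORT A =====
-- "".join([char if char == guess or char in current_progress else "_" for char in word])
def famPattern (guess : String) (current_progress : List String) (word : String) : String :=
  String.ofList (word.toList.map (fun c =>
    if String.singleton c = guess ∨ String.singleton c ∈ current_progress then c else '_'))

def get_word_families (word_list : List String) (guess : String) (current_progress : List String) : List (String × List String) :=
  (word_list.foldl (fun fams w =>
      let p := famPattern guess current_progress w
      -- if family_pattern not in families: families[family_pattern] = []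
      let fams' := if fams.contains p = false then fams.insert p ([] : List String) else fams
      -- families[family_pattern].append(word)
      fams'.modify p [] (fun v => v ++ [w]))
    PySem.Dict.empty).items

-- ===== PORT B =====
def altPattern (guess : String) (current_progress : List String) (word : String) : String :=
  String.ofList (word.toList.map (fun c =>
    if String.singleton c = guess ∨ String.singleton c ∈ current_progress then c else '_'))

def get_word_families_alt (word_list : List String) (guess : String) (current_progress : List String) : List (String × List String) :=
  let pats := word_list.map (altPattern guess current_progress)
  let keys := PySem.List.dedup pats
  keys.map (fun k => (k, ((pats.zip word_list).filter (fun pr => pr.1 == k)).map (fun pr => pr.2)))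

-- ===== PRECONDITION & SPEC =====
def Spec_get_word_families (word_list : List String) (guess : String) (current_progress : List String) (out : List (String × List String)) : Prop := out = get_word_families_alt word_list guess current_progress
instance (word_list : List String) (guess : String) (current_progress : List String) (out : List (String × List String)) : Decidable (Spec_get_word_families word_list guess current_progress out) := by unfold Spec_get_word_families; infer_instance

-- ===== CLAIM (what is proved, stated in full; the proofs are below) =====
def Claim_equal_get_word_families : Prop := ∀ (word_list : List String) (guess : String) (current_progress : List String), Dom_get_word_families word_list guess current_progress → Spec_get_word_families word_list guess current_progress (get_word_families word_list guess current_progress)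

-- ===== LEMMAS AND PROOFS =====

-- A's "setdefault then append" step is exactly Dict.modify with default [].
lemma step_eq_modify (d : PySem.Dict String (List String)) (p w : String) :
    (if d.contains p = false then d.insert p ([] : List String) else d).modify p [] (fun v => v ++ [w])
      = d.modify p [] (fun v => v ++ [w]) := by
  by_cases h : d.contains p = false
  · simp only [h, if_pos, PySem.Dict.modify]
    have hg : (d.insert p ([] : List String)).getD p [] = [] := by
      simp [PySem.Dict.getD_insert_self]
    rw [hg, PySem.Dict.insert_insert_self,
      PySem.Dict.getD_of_not_contains d [] (by simpa using h)]
  · simp [h]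

lemma zip_map_self {α β : Type} (f : α → β) (l : List α) :
    (l.map f).zip l = l.map (fun x => (f x, x)) := by
  induction l with
  | nil => rfl
  | cons x xs ih => simp [ih]

-- the whole loop of A, started from any dict, is the plain grouping loop
lemma foldA_eq_foldM (g : String) (cp : List String) (wl : List String)
    (d : PySem.Dict String (List String)) :
    wl.foldl (fun fams w =>
        let p := famPattern g cp w
        let fams' := if fams.contains p = false then fams.insert p ([] : List String) else fams
        fams'.modify p [] (fun v => v ++ [w])) d
      = wl.foldl (fun fams w => fams.modify (famPattern g cp w) [] (fun v => v ++ [w])) d := by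
  simp only [step_eq_modify]

theorem get_word_families_eq (word_list : List String) (guess : String) (current_progress : List String) :
    get_word_families word_list guess current_progress = get_word_families_alt word_list guess current_progress := by
  unfold get_word_families get_word_families_alt
  rw [foldA_eq_foldM]
  have hL : word_list.foldl
      (fun fams w => fams.modify (famPattern guess current_progress w) [] (fun v => v ++ [w]))
      PySem.Dict.empty
    = (word_list.map (fun w => (famPattern guess current_progress w, w))).foldl
        (fun d p => d.modify p.1 [] (fun v => v ++ [p.2])) PySem.Dict.empty := by
    rw [List.foldl_map]
  rw [hL]
  set L := word_list.map (fun w => (famPattern guess current_progress w, w)) with hLdef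
  have hnd : ((L.foldl (fun d p => d.modify p.1 [] (fun v => v ++ [p.2])) PySem.Dict.empty).keys).Nodup :=
    PySem.Dict.nodup_keys_foldl_modify_key L Prod.fst [] (fun _ x v => v ++ [x.2]) PySem.Dict.empty PySem.Dict.nodup_keys_empty
  rw [PySem.Dict.items_eq_map_keys _ hnd []]
  have hkeys : (L.foldl (fun d p => d.modify p.1 [] (fun v => v ++ [p.2])) PySem.Dict.empty).keys
      = PySem.Set.ofList (word_list.map (famPattern guess current_progress)) := by
    rw [PySem.Dict.keys_foldl_modify_key L Prod.fst [] (fun _ x v => v ++ [x.2])]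
    rw [PySem.Dict.keys_empty, PySem.Set.update_nil_left]
    simp [hLdef, List.map_map, Function.comp_def]
  rw [hkeys]
  show _ = (PySem.List.dedup (word_list.map (altPattern guess current_progress))).map
    (fun k => (k, (((word_list.map (altPattern guess current_progress)).zip word_list).filter
      (fun pr => pr.1 == k)).map (fun pr => pr.2)))
  have hpat : altPattern guess current_progress = famPattern guess current_progress := rfl
  rw [hpat, zip_map_self, PySem.List.dedup_eq_ofList]
  apply List.map_congr_left
  intro k _
  rw [PySem.Dict.getD_foldl_modify_append L PySem.Dict.empty k, PySem.Dict.getD_empty]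
  simp [hLdef]

-- ===== VERDICT (by name: the statement is the Claim_ definition above) =====
theorem get_word_families_spec : Claim_equal_get_word_families := by
  intro wl g cp _
  exact get_word_families_eq wl g cp
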